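-- pv_equiv track=rewrite | github.com/brandonnoh/investment-bot | reports/daily.py | format_alerts_section
-- ===== SOURCE A (Python) =====
-- def format_alerts_section(alerts_data: dict | None) -> str:
--     """알림 요약 섹션"""
--     if not alerts_data:
--         return "## 🚨 알림\n\n✅ 현재 발생한 알림 없음\n"
--
--     alerts = alerts_data.get("alerts", [])
--     if not alerts:
--         return "## 🚨 알림\n\n✅ 현재 발생한 알림 없음\n"
--
--     lines = ["## 🚨 알림\n"]
--     # 레벨순 정렬: RED > YELLOW > GREEN
--     level_order = {"RED": 0, "YELLOW": 1, "GREEN": 2}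
--     sorted_alerts = sorted(
--         alerts, key=lambda a: level_order.get(a.get("level", "GREEN"), 3)
--     )
--
--     for a in sorted_alerts:
--         lines.append(f"- {a['message']}")
--
--     lines.append("")
--     return "\n".join(lines)
-- ===== SOURCE B (Python) =====
-- def format_alerts_section(alerts_data: dict | None) -> str:
--     """Bucket the alerts by severity in one pass (counting sort) instead of a comparison sort."""
--     if not alerts_data:
--         return "## 🚨 알림\n\n✅ 현재 발생한 알림 없음\n"
--
--     alerts = alerts_data.get("alerts", [])
--     if not alerts:
--         return "## 🚨 알림\n\n✅ 현재 발생한 알림 없음\n"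
--
--     level_order = {"RED": 0, "YELLOW": 1, "GREEN": 2}
--     buckets = [[], [], [], []]
--     for a in alerts:
--         buckets[level_order.get(a.get("level", "GREEN"), 3)].append(f"- {a['message']}")
--
--     lines = ["## 🚨 알림\n"]
--     for b in buckets:
--         lines.extend(b)
--     lines.append("")
--     return "\n".join(lines)
-- ===== Notes on version B (the rewrite author's own statement) =====
-- stated objective: alternative
-- what changed: Replaces the stable comparison sort over the four severity keys by a single-pass bucket (counting) sort: one traversal appends each alert's formatted line to one of four fixed-order buckets, which are then concatenated in severity order.
import Mathlib
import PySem

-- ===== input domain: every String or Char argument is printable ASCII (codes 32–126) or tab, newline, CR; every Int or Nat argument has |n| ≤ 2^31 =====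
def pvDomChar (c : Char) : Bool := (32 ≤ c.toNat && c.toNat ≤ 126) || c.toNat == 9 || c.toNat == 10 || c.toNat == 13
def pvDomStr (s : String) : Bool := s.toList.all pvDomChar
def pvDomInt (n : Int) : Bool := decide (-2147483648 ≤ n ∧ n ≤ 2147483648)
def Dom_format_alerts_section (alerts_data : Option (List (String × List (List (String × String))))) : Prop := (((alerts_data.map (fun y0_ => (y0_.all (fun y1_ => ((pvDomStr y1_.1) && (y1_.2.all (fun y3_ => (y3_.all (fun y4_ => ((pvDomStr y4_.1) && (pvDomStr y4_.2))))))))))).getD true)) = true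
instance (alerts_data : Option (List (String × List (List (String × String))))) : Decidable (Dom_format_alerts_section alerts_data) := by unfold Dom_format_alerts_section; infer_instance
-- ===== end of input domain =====

-- B replaces A's stable comparison sort by a one-pass bucket (counting) sort over the four severity keys; same output proved.

-- ===== PORT A =====
-- fixed section text for the early returns
def pvNoAlerts : String := "## 🚨 알림\n\n✅ 현재 발생한 알림 없음\n"

-- level_order.get(a.get("level", "GREEN"), 3); the assoc-list lookup is first-match, as Python dict lookup
def pvLevelKey (a : List (String × String)) : Int :=
  (List.lookup ((List.lookup "level" a).getD "GREEN")
    [("RED", (0 : Int)), ("YELLOW", 1), ("GREEN", 2)]).getD 3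

-- f"- {a['message']}"; a['message'] RAISES KeyError when absent — those inputs are outside Pre_, the getD "" is never the value
def pvLine (a : List (String × String)) : String := "- " ++ (List.lookup "message" a).getD ""

def format_alerts_section (alerts_data : Option (List (String × List (List (String × String))))) : String :=
  match alerts_data with
  | none => pvNoAlerts
  | some d =>
    if d.isEmpty then pvNoAlerts
    else
      let alerts := (List.lookup "alerts" d).getD []
      if alerts.isEmpty then pvNoAlerts
      else
        let sorted_alerts := PySem.List.sorted alerts pvLevelKey
        let lines : List String := ["## 🚨 알림\n"] ++ sorted_alerts.map pvLine ++ [""]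
        PySem.Str.join "\n" lines

-- ===== PORT B =====
-- buckets[level_order.get(a.get("level","GREEN"),3)].append(f"- {a['message']}") — four buckets as a 4-tuple
def pvBucketStep (bs : List String × List String × List String × List String)
    (a : List (String × String)) : List String × List String × List String × List String :=
  let k := pvLevelKey a
  let line := pvLine a
  if k == 0 then (bs.1 ++ [line], bs.2.1, bs.2.2.1, bs.2.2.2)
  else if k == 1 then (bs.1, bs.2.1 ++ [line], bs.2.2.1, bs.2.2.2)
  else if k == 2 then (bs.1, bs.2.1, bs.2.2.1 ++ [line], bs.2.2.2)
  else (bs.1, bs.2.1, bs.2.2.1, bs.2.2.2 ++ [line])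

def format_alerts_section_alt (alerts_data : Option (List (String × List (List (String × String))))) : String :=
  match alerts_data with
  | none => pvNoAlerts
  | some d =>
    if d.isEmpty then pvNoAlerts
    else
      let alerts := (List.lookup "alerts" d).getD []
      if alerts.isEmpty then pvNoAlerts
      else
        let bs := alerts.foldl pvBucketStep ([], [], [], [])
        PySem.Str.join "\n" (["## 🚨 알림\n"] ++ bs.1 ++ bs.2.1 ++ bs.2.2.1 ++ bs.2.2.2 ++ [""])

-- ===== PRECONDITION & SPEC =====
-- Pre_ excludes exactly the inputs where a['message'] raises KeyError in Python (both A and B raise there).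
def Pre_format_alerts_section (alerts_data : Option (List (String × List (List (String × String))))) : Prop :=
  ((match alerts_data with
    | none => []
    | some d => (List.lookup "alerts" d).getD []).all
      (fun a => (List.lookup "message" a).isSome)) = true
instance (alerts_data : Option (List (String × List (List (String × String))))) : Decidable (Pre_format_alerts_section alerts_data) := by unfold Pre_format_alerts_section; infer_instance

def pvWitness_format_alerts_section : (Option (List (String × List (List (String × String))))) :=
  some [("alerts", [[("level", "RED"), ("message", "drawdown")], [("message", "vix")]])]

def Spec_format_alerts_section (alerts_data : Option (List (String × List (List (String × String))))) (out : String) : Prop := out = format_alerts_section_alt alerts_data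
instance (alerts_data : Option (List (String × List (List (String × String))))) (out : String) : Decidable (Spec_format_alerts_section alerts_data out) := by unfold Spec_format_alerts_section; infer_instance

-- ===== CLAIM (what is proved, stated in full; the proofs are below) =====
def Claim_equal_format_alerts_section : Prop := ∀ (alerts_data : Option (List (String × List (List (String × String))))), Dom_format_alerts_section alerts_data → Pre_format_alerts_section alerts_data → Spec_format_alerts_section alerts_data (format_alerts_section alerts_data)

-- ===== LEMMAS AND PROOFS =====

-- the severity key is always one of 0,1,2,3
theorem pvLevelKey_range (a : List (String × String)) :
    pvLevelKey a = 0 ∨ pvLevelKey a = 1 ∨ pvLevelKey a = 2 ∨ pvLevelKey a = 3 := by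
  unfold pvLevelKey
  simp only [List.lookup]
  repeat' split
  all_goals simp

-- inserting between the ≤-part and the >-part
theorem pvInsertBy_middle {α : Type} (before : α → α → Bool) (x : α) (ys zs : List α)
    (h1 : ∀ y ∈ ys, before x y = false) (h2 : ∀ z ∈ zs, before x z = true) :
    PySem.List.insertBy before x (ys ++ zs) = ys ++ x :: zs := by
  induction ys with
  | nil =>
    cases zs with
    | nil => simp [PySem.List.insertBy]
    | cons z zs' => simp [PySem.List.insertBy, h2 z (by simp)]
  | cons y ys' ih =>
    have hy : before x y = false := h1 y (by simp)
    simp only [List.cons_append, PySem.List.insertBy, hy]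
    simp only [Bool.false_eq_true, if_false, List.cons.injEq, true_and]
    exact ih (fun y hy => h1 y (by simp [hy]))

def pvF {α : Type} (key : α → Int) (p : List α) : List α :=
  p.filter (fun a => key a == 0) ++ p.filter (fun a => key a == 1) ++
  p.filter (fun a => key a == 2) ++ p.filter (fun a => key a == 3)

theorem pvIns_pvF {α : Type} (key : α → Int) (x : α) (p : List α)
    (hx : key x = 0 ∨ key x = 1 ∨ key x = 2 ∨ key x = 3) :
    PySem.List.insertBy (fun a b => decide (key a < key b)) x (pvF key p) = pvF key (p ++ [x]) := by
  have memf : ∀ (i : Int) (y : α), y ∈ p.filter (fun a => key a == i) → key y = i := by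
    intro i y hy
    have := List.of_mem_filter hy
    simpa using this
  rcases hx with h | h | h | h
  · rw [show pvF key p = p.filter (fun a => key a == 0) ++
        (p.filter (fun a => key a == 1) ++ p.filter (fun a => key a == 2) ++
         p.filter (fun a => key a == 3)) by simp [pvF], pvInsertBy_middle]
    · simp [pvF, List.filter_append, h]
    · intro y hy; simp [memf _ _ hy, h]
    · intro z hz
      simp only [List.mem_append] at hz
      rcases hz with (hz | hz) | hz <;> simp [memf _ _ hz, h]
  · rw [show pvF key p = (p.filter (fun a => key a == 0) ++ p.filter (fun a => key a == 1)) ++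
        (p.filter (fun a => key a == 2) ++ p.filter (fun a => key a == 3)) by simp [pvF],
        pvInsertBy_middle]
    · simp [pvF, List.filter_append, h]
    · intro y hy
      simp only [List.mem_append] at hy
      rcases hy with hy | hy <;> simp [memf _ _ hy, h]
    · intro z hz
      simp only [List.mem_append] at hz
      rcases hz with hz | hz <;> simp [memf _ _ hz, h]
  · rw [show pvF key p = (p.filter (fun a => key a == 0) ++ p.filter (fun a => key a == 1) ++
        p.filter (fun a => key a == 2)) ++ p.filter (fun a => key a == 3) by simp [pvF],
        pvInsertBy_middle]
    · simp [pvF, List.filter_append, h]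
    · intro y hy
      simp only [List.mem_append] at hy
      rcases hy with (hy | hy) | hy <;> simp [memf _ _ hy, h]
    · intro z hz; simp [memf _ _ hz, h]
  · rw [show pvF key p = (p.filter (fun a => key a == 0) ++ p.filter (fun a => key a == 1) ++
        p.filter (fun a => key a == 2) ++ p.filter (fun a => key a == 3)) ++ [] by simp [pvF],
        pvInsertBy_middle]
    · simp [pvF, List.filter_append, h]
    · intro y hy
      simp only [List.mem_append] at hy
      rcases hy with ((hy | hy) | hy) | hy <;> simp [memf _ _ hy, h]
    · intro z hz; simp at hz

theorem pvFoldl_ins_pvF {α : Type} (key : α → Int) (xs p : List α)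
    (h : ∀ x ∈ xs, key x = 0 ∨ key x = 1 ∨ key x = 2 ∨ key x = 3) :
    xs.foldl (fun acc x => PySem.List.insertBy (fun a b => decide (key a < key b)) x acc) (pvF key p)
      = pvF key (p ++ xs) := by
  induction xs generalizing p with
  | nil => simp
  | cons x xs' ih =>
    simp only [List.foldl_cons]
    rw [pvIns_pvF key x p (h x (by simp)),
        ih (p ++ [x]) (fun y hy => h y (by simp [hy]))]
    simp

-- the stable sort with keys in {0,1,2,3} is the concatenation of the four key-filters
theorem pvSorted_eq_pvF {α : Type} (key : α → Int) (xs : List α)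
    (h : ∀ x ∈ xs, key x = 0 ∨ key x = 1 ∨ key x = 2 ∨ key x = 3) :
    PySem.List.sorted xs key = pvF key xs := by
  have := pvFoldl_ins_pvF key xs [] h
  simpa [PySem.List.sorted, pvF] using this

-- one pass of bucketing = the four mapped filters, appended to whatever is in the buckets
theorem pvBucketFold (xs : List (List (String × String))) (b0 b1 b2 b3 : List String) :
    xs.foldl pvBucketStep (b0, b1, b2, b3) =
      (b0 ++ (xs.filter (fun a => pvLevelKey a == 0)).map pvLine,
       b1 ++ (xs.filter (fun a => pvLevelKey a == 1)).map pvLine,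
       b2 ++ (xs.filter (fun a => pvLevelKey a == 2)).map pvLine,
       b3 ++ (xs.filter (fun a => pvLevelKey a == 3)).map pvLine) := by
  induction xs generalizing b0 b1 b2 b3 with
  | nil => simp
  | cons x xs' ih =>
    simp only [List.foldl_cons]
    rcases pvLevelKey_range x with h | h | h | h <;>
      simp [pvBucketStep, h, ih]

theorem format_alerts_section_eq (alerts_data : Option (List (String × List (List (String × String))))) :
    format_alerts_section alerts_data = format_alerts_section_alt alerts_data := by
  unfold format_alerts_section format_alerts_section_alt
  cases alerts_data with
  | none => rfl
  | some d =>
    simp only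
    split_ifs with h1 h2
    · rfl
    · rfl
    · rw [pvSorted_eq_pvF pvLevelKey _ (fun x _ => pvLevelKey_range x),
          pvBucketFold _ [] [] [] []]
      simp [pvF]

-- ===== VERDICT (by name: the statement is the Claim_ definition above) =====
theorem format_alerts_section_spec : Claim_equal_format_alerts_section := by
  intro ad _ _
  unfold Spec_format_alerts_section
  exact format_alerts_section_eq ad
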